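-- pv_equiv track=rewrite | github.com/sukritsilas/phagent | accRScorerAndPrinter.py | geneCounter
-- ===== SOURCE A (Python) =====
-- def geneCounter(d): #Input is a dictionary of lists
-- 	e = {}
-- 	dg = {}
-- 	for v in d:
-- 		dg[v] = {}
-- 		for exg in d[v][0]:
-- 			# Make a mirror dict with just the gene cluster representatives, this will speed up counting later
-- 			if exg.split('_is_')[0] not in dg[v]:
-- 				dg[v][exg.split('_is_')[0]] = ''
-- 			if exg not in e:
-- 				e[exg] = 0
-- 	# Going virus by virus will not allow duplicated genes to be double counted
-- 	for exg in e:
-- 		for v in dg: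
-- 			if exg.split('_is_')[0] in dg[v]:
-- 				e[exg]+=1
-- 	#Output is a dictionary of gene IDs with counts as values
-- 	return e
-- ===== SOURCE B (Python) =====
-- def geneCounter(d): #Input is a dictionary of lists
-- 	# One pass: count, per cluster representative, how many viruses contain it;
-- 	# then each gene's count is a single lookup of its representative.
-- 	repcount = {}
-- 	for v in d:
-- 		for r in dict.fromkeys(g.split('_is_')[0] for g in d[v][0]):
-- 			repcount[r] = repcount.get(r, 0) + 1
-- 	e = {}
-- 	for v in d:
-- 		for g in d[v][0]:
-- 			if g not in e:
-- 				e[g] = repcount[g.split('_is_')[0]]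
-- 	return e
-- ===== Notes on version B (the rewrite author's own statement) =====
-- stated objective: faster
-- what changed: A counts, for every gene, over every virus whether its representative occurs (|genes|x|viruses| scans); B makes one pass that counts viruses per cluster representative and then answers each gene with a single dictionary lookup.
import Mathlib
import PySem

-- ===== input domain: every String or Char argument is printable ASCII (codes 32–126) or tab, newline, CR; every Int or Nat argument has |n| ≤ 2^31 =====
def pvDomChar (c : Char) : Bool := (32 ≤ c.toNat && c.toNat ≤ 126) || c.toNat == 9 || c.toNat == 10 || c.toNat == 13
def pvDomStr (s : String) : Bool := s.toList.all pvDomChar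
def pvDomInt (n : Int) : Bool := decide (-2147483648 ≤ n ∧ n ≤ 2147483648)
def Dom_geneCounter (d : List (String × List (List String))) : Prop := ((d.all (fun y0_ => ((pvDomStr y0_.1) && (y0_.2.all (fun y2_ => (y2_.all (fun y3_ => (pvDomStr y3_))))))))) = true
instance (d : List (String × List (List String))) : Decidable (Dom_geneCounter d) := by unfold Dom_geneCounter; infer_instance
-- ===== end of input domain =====

-- B replaces A's quadratic count (every gene × every virus) by one pass that counts viruses
-- per cluster representative, then a single lookup per gene (asymptotically faster).

-- shared helper: exg.split('_is_')[0]  (split? is some for the non-empty separator; [0] of a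
-- split result never raises, so the defaults are never used)
def pvRep (g : String) : String :=
  PySem.List.pyGetD ((PySem.Str.split? g "_is_").getD []) 0 ""

-- ===== PORT A =====
-- 'for v in d' iterates the dict's keys; we fold over its items, d[v] being the item's value.
def geneCounter (d : List (String × List (List String))) : List (String × Int) :=
  let dd := PySem.Dict.ofList d
  let st := dd.items.foldl
    (fun (acc : PySem.Dict String Int × PySem.Dict String (PySem.Dict String String)) p =>
      -- dg[v] = {}; for exg in d[v][0]: two 'if x not in …: …[x] = …' = setdefault
      -- (p.2.headD [] is d[v][0]; Pre_ excludes the empty list, where Python raises IndexError)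
      let inner := (p.2.headD []).foldl
        (fun (acc2 : PySem.Dict String Int × PySem.Dict String String) exg =>
          (acc2.1.setdefault exg 0, acc2.2.setdefault (pvRep exg) ""))
        (acc.1, PySem.Dict.empty)
      (inner.1, acc.2.insert p.1 inner.2))
    (PySem.Dict.empty, PySem.Dict.empty)
  let e2 := st.1.keys.foldl
    (fun e exg => st.2.items.foldl
      (fun e p => if p.2.contains (pvRep exg) then e.insert exg (e.getD exg 0 + 1) else e)
      e)
    st.1
  e2.items

-- ===== PORT B =====
def geneCounter_alt (d : List (String × List (List String))) : List (String × Int) :=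
  let dd := PySem.Dict.ofList d
  -- repcount[r] = number of viruses whose gene list contains a gene with representative r
  -- (dict.fromkeys over the representatives = PySem.List.dedup)
  let repcount := dd.items.foldl
    (fun (rc : PySem.Dict String Int) p =>
      (PySem.List.dedup ((p.2.headD []).map pvRep)).foldl
        (fun rc r => rc.insert r (rc.getD r 0 + 1)) rc)
    PySem.Dict.empty
  -- e[g] = repcount[g.split('_is_')[0]]; the key is always present, so getD's 0 is never used
  let e := dd.items.foldl
    (fun (e : PySem.Dict String Int) p =>
      (p.2.headD []).foldl
        (fun e g => if e.contains g then e else e.insert g (repcount.getD (pvRep g) 0)) e)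
    PySem.Dict.empty
  e.items

-- ===== PRECONDITION & SPEC =====
-- Pre_ excludes exactly the inputs where Python raises IndexError: a virus whose (effective,
-- i.e. after dict key collapsing) value list is empty, so that d[v][0] does not exist.
def Pre_geneCounter (d : List (String × List (List String))) : Prop :=
  ∀ p ∈ (PySem.Dict.ofList d).items, p.2 ≠ []
instance (d : List (String × List (List String))) : Decidable (Pre_geneCounter d) := by
  unfold Pre_geneCounter; infer_instance

def pvWitness_geneCounter : (List (String × List (List String))) :=
  [("v1", [["a_is_x", "b"]]), ("v2", [["c_is_x"], []])]

def Spec_geneCounter (d : List (String × List (List String))) (out : List (String × Int)) : Prop := out = geneCounter_alt d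
instance (d : List (String × List (List String))) (out : List (String × Int)) : Decidable (Spec_geneCounter d out) := by unfold Spec_geneCounter; infer_instance

-- ===== CLAIM (what is proved, stated in full; the proofs are below) =====
def Claim_equal_geneCounter : Prop := ∀ (d : List (String × List (List String))), Dom_geneCounter d → Pre_geneCounter d → Spec_geneCounter d (geneCounter d)

-- ===== LEMMAS AND PROOFS =====

-- the list d[v][0] of a dict item, and its representatives
def pvGenes (p : String × List (List String)) : List String := p.2.headD []

-- ---- generic folds ----

-- keys of a 'setdefault g 0' loop
theorem keys_foldl_setdefault (l : List String) (e : PySem.Dict String Int) :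
    (l.foldl (fun e g => e.setdefault g 0) e).keys = PySem.Set.update e.keys l := by
  induction l generalizing e with
  | nil => simp [PySem.Set.update_nil]
  | cons g l ih =>
      simp only [List.foldl_cons, PySem.Set.update_cons]
      rw [ih]
      congr 1
      rw [PySem.Dict.keys_setdefault]
      by_cases h : e.contains g = true
      · simp [h, PySem.Set.add, PySem.Dict.contains_iff_mem_keys e g |>.mp h]
      · have h' : g ∉ e.keys := fun hm => h ((PySem.Dict.contains_iff_mem_keys e g).mpr hm)
        simp [h, PySem.Set.add, h']

theorem getD_foldl_setdefault (l : List String) (e : PySem.Dict String Int) (g : String) :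
    (l.foldl (fun e g => e.setdefault g 0) e).getD g 0 = e.getD g 0 := by
  induction l generalizing e with
  | nil => rfl
  | cons x l ih =>
      simp only [List.foldl_cons]
      rw [ih]
      by_cases hx : g = x
      · subst hx; rw [PySem.Dict.getD_setdefault_self]
      · rw [PySem.Dict.getD_eq_get?_getD, PySem.Dict.get?_setdefault_of_ne _ _ hx,
            ← PySem.Dict.getD_eq_get?_getD]

-- keys of a 'setdefault (rep g) ""' loop (String values)
theorem keys_foldl_setdefault_rep (l : List String) (e : PySem.Dict String String) :
    (l.foldl (fun e g => e.setdefault (pvRep g) "") e).keys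
      = PySem.Set.update e.keys (l.map pvRep) := by
  induction l generalizing e with
  | nil => simp [PySem.Set.update_nil]
  | cons g l ih =>
      simp only [List.foldl_cons, List.map_cons, PySem.Set.update_cons]
      rw [ih]
      congr 1
      rw [PySem.Dict.keys_setdefault]
      by_cases h : e.contains (pvRep g) = true
      · simp [PySem.Set.add, (PySem.Dict.contains_iff_mem_keys e (pvRep g)).mp h, h]
      · have h' : pvRep g ∉ e.keys := fun hm => h ((PySem.Dict.contains_iff_mem_keys e _).mpr hm)
        simp [PySem.Set.add, h, h']

-- phase-2 inner loop of A: increments e at exg by the number of matching dicts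
theorem getD_foldl_count (its : List (String × PySem.Dict String String)) (exg : String)
    (e : PySem.Dict String Int) (k : String) :
    (its.foldl (fun e p => if p.2.contains (pvRep exg) then e.insert exg (e.getD exg 0 + 1) else e) e).getD k 0
      = e.getD k 0 + (if k = exg then (its.countP (fun p => p.2.contains (pvRep exg)) : Int) else 0) := by
  induction its generalizing e with
  | nil => simp
  | cons p its ih =>
      simp only [List.foldl_cons, List.countP_cons]
      by_cases hp : p.2.contains (pvRep exg) = true
      · simp only [hp, if_true]
        rw [ih, PySem.Dict.getD_insert]
        by_cases hk : k = exg
        · simp [hk]; ring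
        · simp [hk]
      · simp only [hp]
        rw [ih]
        by_cases hk : k = exg <;> simp [hk]

-- keys are unchanged by phase 2's inner loop (it only reinserts existing keys)
theorem keys_foldl_count (its : List (String × PySem.Dict String String)) (exg : String)
    (e : PySem.Dict String Int) (hx : e.contains exg = true) :
    (its.foldl (fun e p => if p.2.contains (pvRep exg) then e.insert exg (e.getD exg 0 + 1) else e) e).keys
      = e.keys := by
  induction its generalizing e with
  | nil => rfl
  | cons p its ih =>
      simp only [List.foldl_cons]
      by_cases hp : p.2.contains (pvRep exg) = true
      · simp only [hp, if_true]
        rw [ih, PySem.Dict.keys_insert_of_contains _ _ hx]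
        rw [PySem.Dict.contains_insert]; simp
      · rw [if_neg hp]; exact ih _ hx

-- B's out-loop, over the flattened gene list
theorem keys_foldl_ifins (l : List String) (f : String → Int) (e : PySem.Dict String Int) :
    (l.foldl (fun e g => if e.contains g then e else e.insert g (f g)) e).keys
      = PySem.Set.update e.keys l := by
  induction l generalizing e with
  | nil => simp [PySem.Set.update_nil]
  | cons g l ih =>
      simp only [List.foldl_cons, PySem.Set.update_cons]
      by_cases h : e.contains g = true
      · rw [if_pos h, ih]
        congr 1
        simp [PySem.Set.add, (PySem.Dict.contains_iff_mem_keys e g).mp h]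
      · rw [if_neg h, ih]
        congr 1
        have h' : g ∉ e.keys := fun hm => h ((PySem.Dict.contains_iff_mem_keys e g).mpr hm)
        have h'' : e.contains g = false := by revert h; cases e.contains g <;> simp
        rw [PySem.Dict.keys_insert_of_not_contains _ _ h'']
        simp [PySem.Set.add, h']

theorem getD_foldl_ifins (l : List String) (f : String → Int) (e : PySem.Dict String Int) (g : String) :
    (l.foldl (fun e g => if e.contains g then e else e.insert g (f g)) e).getD g 0
      = if e.contains g then e.getD g 0 else if g ∈ l then f g else 0 := by
  induction l generalizing e with
  | nil =>
      by_cases h : e.contains g = true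
      · simp [h]
      · have h'' : e.contains g = false := by revert h; cases e.contains g <;> simp
        simp [h, PySem.Dict.getD_of_not_contains _ _ h'']
  | cons x l ih =>
      simp only [List.foldl_cons]
      by_cases hx : e.contains x = true
      · rw [if_pos hx, ih]
        by_cases hg : e.contains g = true
        · simp [hg]
        · have hgx : g ≠ x := fun hh => by subst hh; exact (by simp [hx] at hg)
          simp [hg, List.mem_cons, hgx]
      · rw [if_neg hx, ih]
        by_cases hgx : g = x
        · subst hgx
          simp [hx]
        · by_cases hg : e.contains g = true
          · simp [PySem.Dict.contains_insert, PySem.Dict.getD_insert, hgx, hg]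
          · simp [PySem.Dict.contains_insert, hgx, hg, List.mem_cons]

-- B's repcount characterized
theorem getD_repcount (its : List (String × List (List String))) (rc : PySem.Dict String Int) (r : String) :
    (its.foldl (fun rc p => (PySem.List.dedup ((pvGenes p).map pvRep)).foldl
        (fun rc r => rc.insert r (rc.getD r 0 + 1)) rc) rc).getD r 0
      = rc.getD r 0 + (its.countP (fun p => (pvGenes p).map pvRep |>.contains r) : Int) := by
  induction its generalizing rc with
  | nil => simp
  | cons p its ih =>
      simp only [List.foldl_cons, List.countP_cons]
      rw [ih, PySem.Dict.getD_foldl_insert_add_one]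
      have hcnt : (PySem.List.dedup ((pvGenes p).map pvRep)).count r
          = if ((pvGenes p).map pvRep).contains r then 1 else 0 := by
        by_cases hm : r ∈ (pvGenes p).map pvRep
        · rw [if_pos (by simpa using hm)]
          have hnd : (PySem.List.dedup ((pvGenes p).map pvRep)).Nodup := by
            rw [PySem.List.dedup_eq_ofList]; exact PySem.Set.nodup_ofList _
          have hm' : r ∈ PySem.List.dedup ((pvGenes p).map pvRep) := by
            rw [PySem.List.dedup_eq_ofList]; exact (PySem.Set.mem_ofList _ _).mpr hm
          exact List.count_eq_one_of_mem hnd hm'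
        · rw [if_neg (by simpa using hm)]
          refine List.count_eq_zero.mpr ?_
          rw [PySem.List.dedup_eq_ofList]
          exact fun hh => hm ((PySem.Set.mem_ofList _ _).mp hh)
      rw [hcnt]
      push_cast
      ring

-- ---- A's phase 1 split into its two components ----

theorem phase1_split (its : List (String × List (List String))) :
    (its.foldl
      (fun (acc : PySem.Dict String Int × PySem.Dict String (PySem.Dict String String)) p =>
        let inner := (p.2.headD []).foldl
          (fun (acc2 : PySem.Dict String Int × PySem.Dict String String) exg =>
            (acc2.1.setdefault exg 0, acc2.2.setdefault (pvRep exg) ""))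
          (acc.1, PySem.Dict.empty)
        (inner.1, acc.2.insert p.1 inner.2))
      (PySem.Dict.empty, PySem.Dict.empty))
    = (its.foldl (fun e p => (pvGenes p).foldl (fun e g => e.setdefault g 0) e) PySem.Dict.empty,
       its.foldl (fun dg p => dg.insert p.1
          ((pvGenes p).foldl (fun dv g => dv.setdefault (pvRep g) "") PySem.Dict.empty)) PySem.Dict.empty) := by
  have hstep : (fun (acc : PySem.Dict String Int × PySem.Dict String (PySem.Dict String String)) (p : String × List (List String)) =>
      let inner := (p.2.headD []).foldl
        (fun (acc2 : PySem.Dict String Int × PySem.Dict String String) exg =>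
          (acc2.1.setdefault exg 0, acc2.2.setdefault (pvRep exg) ""))
        (acc.1, PySem.Dict.empty)
      (inner.1, acc.2.insert p.1 inner.2))
      = (fun acc p => ((pvGenes p).foldl (fun e g => e.setdefault g 0) acc.1,
          acc.2.insert p.1 ((pvGenes p).foldl (fun dv g => dv.setdefault (pvRep g) "") PySem.Dict.empty))) := by
    funext acc p
    have hin : (p.2.headD []).foldl
        (fun (acc2 : PySem.Dict String Int × PySem.Dict String String) exg =>
          (acc2.1.setdefault exg 0, acc2.2.setdefault (pvRep exg) ""))
        (acc.1, PySem.Dict.empty)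
        = ((p.2.headD []).foldl (fun e g => e.setdefault g 0) acc.1,
           (p.2.headD []).foldl (fun dv g => dv.setdefault (pvRep g) "") PySem.Dict.empty) :=
      PySem.List.foldl_prod_mk (fun (e : PySem.Dict String Int) g => e.setdefault g 0)
        (fun (dv : PySem.Dict String String) g => dv.setdefault (pvRep g) "") (p.2.headD []) acc.1 PySem.Dict.empty
    rw [hin]; rfl
  rw [hstep]
  exact PySem.List.foldl_prod_mk
    (fun (e : PySem.Dict String Int) (p : String × List (List String)) =>
      (pvGenes p).foldl (fun e g => e.setdefault g 0) e)
    (fun (dg : PySem.Dict String (PySem.Dict String String)) p =>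
      dg.insert p.1 ((pvGenes p).foldl (fun dv g => dv.setdefault (pvRep g) "") PySem.Dict.empty))
    its PySem.Dict.empty PySem.Dict.empty

-- the inner dicts of dg test exactly membership among the representatives
theorem contains_dv (p : String × List (List String)) (r : String) :
    ((pvGenes p).foldl (fun dv g => dv.setdefault (pvRep g) "") PySem.Dict.empty).contains r
      = ((pvGenes p).map pvRep).contains r := by
  rw [Bool.eq_iff_iff]
  simp [PySem.Dict.contains_iff_mem_keys, keys_foldl_setdefault_rep, PySem.Dict.keys_empty,
        PySem.Set.mem_update]

-- phase 2 of A: each key's value becomes the count of matching inner dicts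
theorem phase2_getD (dgitems : List (String × PySem.Dict String String)) (ks : List String)
    (e : PySem.Dict String Int) (hnd : ks.Nodup) (hks : ∀ x ∈ ks, e.contains x = true) (g : String) :
    (ks.foldl (fun e exg => dgitems.foldl
        (fun e p => if p.2.contains (pvRep exg) then e.insert exg (e.getD exg 0 + 1) else e) e) e).getD g 0
      = e.getD g 0 + (if g ∈ ks then (dgitems.countP (fun p => p.2.contains (pvRep g)) : Int) else 0) := by
  induction ks generalizing e with
  | nil => simp
  | cons exg ks ih =>
      simp only [List.foldl_cons]
      have hx : e.contains exg = true := hks exg (by simp)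
      have hkeys := keys_foldl_count dgitems exg e hx
      have hks' : ∀ x ∈ ks, (dgitems.foldl
          (fun e p => if p.2.contains (pvRep exg) then e.insert exg (e.getD exg 0 + 1) else e) e).contains x = true := by
        intro x hxm
        rw [PySem.Dict.contains_iff_mem_keys, hkeys, ← PySem.Dict.contains_iff_mem_keys]
        exact hks x (by simp [hxm])
      rw [ih _ hnd.of_cons hks', getD_foldl_count]
      have hnm : exg ∉ ks := (List.nodup_cons.mp hnd).1
      by_cases hg : g = exg
      · subst hg; simp [hnm]
      · simp [hg, List.mem_cons]

theorem phase2_keys (dgitems : List (String × PySem.Dict String String)) (ks : List String)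
    (e : PySem.Dict String Int) (hks : ∀ x ∈ ks, e.contains x = true) :
    (ks.foldl (fun e exg => dgitems.foldl
        (fun e p => if p.2.contains (pvRep exg) then e.insert exg (e.getD exg 0 + 1) else e) e) e).keys
      = e.keys := by
  induction ks generalizing e with
  | nil => rfl
  | cons exg ks ih =>
      simp only [List.foldl_cons]
      have hx : e.contains exg = true := hks exg (by simp)
      have hkeys := keys_foldl_count dgitems exg e hx
      have hks' : ∀ x ∈ ks, (dgitems.foldl
          (fun e p => if p.2.contains (pvRep exg) then e.insert exg (e.getD exg 0 + 1) else e) e).contains x = true := by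
        intro x hxm
        rw [PySem.Dict.contains_iff_mem_keys, hkeys, ← PySem.Dict.contains_iff_mem_keys]
        exact hks x (by simp [hxm])
      rw [ih _ hks', hkeys]

-- the whole equivalence, stated over the item list of the dict
theorem items_equal (its : List (String × List (List String)))
    (hnd : (its.map Prod.fst).Nodup) :
    (let st := its.foldl
        (fun (acc : PySem.Dict String Int × PySem.Dict String (PySem.Dict String String)) p =>
          let inner := (p.2.headD []).foldl
            (fun (acc2 : PySem.Dict String Int × PySem.Dict String String) exg =>
              (acc2.1.setdefault exg 0, acc2.2.setdefault (pvRep exg) ""))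
            (acc.1, PySem.Dict.empty)
          (inner.1, acc.2.insert p.1 inner.2))
        (PySem.Dict.empty, PySem.Dict.empty)
      let e2 := st.1.keys.foldl
        (fun e exg => st.2.items.foldl
          (fun e p => if p.2.contains (pvRep exg) then e.insert exg (e.getD exg 0 + 1) else e)
          e)
        st.1
      e2.items)
    = (let repcount := its.foldl
        (fun (rc : PySem.Dict String Int) p =>
          (PySem.List.dedup ((p.2.headD []).map pvRep)).foldl
            (fun rc r => rc.insert r (rc.getD r 0 + 1)) rc)
        PySem.Dict.empty
      let e := its.foldl
        (fun (e : PySem.Dict String Int) p =>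
          (p.2.headD []).foldl
            (fun e g => if e.contains g then e else e.insert g (repcount.getD (pvRep g) 0)) e)
        PySem.Dict.empty
      e.items) := by
  simp only [phase1_split]
  simp only [show ∀ p : String × List (List String), p.2.headD [] = pvGenes p from fun _ => rfl]
  set allG := its.flatMap pvGenes with hallG
  set E0 := its.foldl (fun (e : PySem.Dict String Int) p =>
    (pvGenes p).foldl (fun e g => e.setdefault g 0) e) PySem.Dict.empty with hE0def
  set DG := its.foldl (fun dg p =>
    dg.insert p.1 ((pvGenes p).foldl (fun dv g => dv.setdefault (pvRep g) "") PySem.Dict.empty))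
    PySem.Dict.empty with hDGdef
  set RC := its.foldl (fun (rc : PySem.Dict String Int) p =>
    (PySem.List.dedup ((pvGenes p).map pvRep)).foldl (fun rc r => rc.insert r (rc.getD r 0 + 1)) rc)
    PySem.Dict.empty with hRCdef
  set OUT := its.foldl (fun (e : PySem.Dict String Int) p =>
    (pvGenes p).foldl (fun e g => if e.contains g then e else e.insert g (RC.getD (pvRep g) 0)) e)
    PySem.Dict.empty with hOUTdef
  set E2 := E0.keys.foldl (fun (e : PySem.Dict String Int) exg => DG.items.foldl
    (fun e p => if p.2.contains (pvRep exg) then e.insert exg (e.getD exg 0 + 1) else e) e) E0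
    with hE2def
  -- A's first loop, flattened
  have hE0flat : E0 = allG.foldl (fun (e : PySem.Dict String Int) g => e.setdefault g 0) PySem.Dict.empty := by
    rw [hE0def, hallG]; exact (List.foldl_flatMap).symm
  have hE0keys : E0.keys = PySem.Set.ofList allG := by
    rw [hE0flat, keys_foldl_setdefault, PySem.Dict.keys_empty, PySem.Set.update_nil_left]
  have hE0nd : E0.keys.Nodup := by rw [hE0keys]; exact PySem.Set.nodup_ofList _
  have hE0getD : ∀ g, E0.getD g 0 = 0 := fun g => by
    rw [hE0flat, getD_foldl_setdefault, PySem.Dict.getD_empty]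
  -- the mirror dict dg
  have hDGitems : DG.items = its.map (fun p =>
      (p.1, (pvGenes p).foldl (fun dv g => dv.setdefault (pvRep g) "") PySem.Dict.empty)) := by
    rw [hDGdef]
    exact (PySem.Dict.items_foldl_insert_fresh its Prod.fst _ PySem.Dict.empty
      (fun a _ => PySem.Dict.contains_empty _) hnd).trans
      (by rw [show (PySem.Dict.empty : PySem.Dict String (PySem.Dict String String)).items = [] from rfl,
              List.nil_append])
  have hcnt : ∀ g, DG.items.countP (fun p => p.2.contains (pvRep g))
      = its.countP (fun p => ((pvGenes p).map pvRep).contains (pvRep g)) := fun g => by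
    rw [hDGitems, List.countP_map]
    refine List.countP_congr fun p _ => ?_
    simp only [Function.comp]
    rw [contains_dv]
  -- A's counting loop
  have hcont : ∀ x ∈ E0.keys, E0.contains x = true := fun x hx =>
    (PySem.Dict.contains_iff_mem_keys E0 x).mpr hx
  have hE2keys : E2.keys = E0.keys := phase2_keys DG.items E0.keys E0 hcont
  have hE2nd : E2.keys.Nodup := by rw [hE2keys]; exact hE0nd
  have hE2getD : ∀ g, E2.getD g 0
      = if g ∈ allG then (its.countP (fun p => ((pvGenes p).map pvRep).contains (pvRep g)) : Int) else 0 := by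
    intro g
    rw [hE2def, phase2_getD DG.items E0.keys E0 hE0nd hcont g, hE0getD, zero_add, hcnt]
    by_cases hm : g ∈ allG
    · rw [if_pos hm, if_pos (by rw [hE0keys]; exact (PySem.Set.mem_ofList _ _).mpr hm)]
    · rw [if_neg hm, if_neg (by rw [hE0keys]; exact fun hh => hm ((PySem.Set.mem_ofList _ _).mp hh))]
  -- B's representative counter
  have hRC : ∀ r, RC.getD r 0
      = (its.countP (fun p => ((pvGenes p).map pvRep).contains r) : Int) := fun r => by
    rw [hRCdef, getD_repcount, PySem.Dict.getD_empty, zero_add]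
  -- B's output dict, flattened
  have hOUTflat : OUT = allG.foldl
      (fun e g => if e.contains g then e else e.insert g (RC.getD (pvRep g) 0)) PySem.Dict.empty := by
    rw [hOUTdef, hallG]; exact (List.foldl_flatMap).symm
  have hOUTkeys : OUT.keys = PySem.Set.ofList allG := by
    rw [hOUTflat, keys_foldl_ifins, PySem.Dict.keys_empty, PySem.Set.update_nil_left]
  have hOUTnd : OUT.keys.Nodup := by rw [hOUTkeys]; exact PySem.Set.nodup_ofList _
  have hOUTgetD : ∀ g, OUT.getD g 0 = if g ∈ allG then RC.getD (pvRep g) 0 else 0 := fun g => by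
    rw [hOUTflat, getD_foldl_ifins, PySem.Dict.contains_empty]
    simp
  -- both dicts have the same keys and the same value at every key
  rw [PySem.Dict.items_eq_map_keys E2 hE2nd 0, PySem.Dict.items_eq_map_keys OUT hOUTnd 0,
      hE2keys, hE0keys, hOUTkeys]
  refine List.map_congr_left fun k hk => ?_
  have hkg : k ∈ allG := (PySem.Set.mem_ofList _ _).mp hk
  rw [hE2getD, hOUTgetD, if_pos hkg, if_pos hkg, hRC]

-- ===== VERDICT (by name: the statement is the Claim_ definition above) =====
theorem geneCounter_spec : Claim_equal_geneCounter := by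
  intro d _hdom _hpre
  unfold Spec_geneCounter geneCounter geneCounter_alt
  have hnd : (((PySem.Dict.ofList d).items.map Prod.fst)).Nodup := by
    have h := PySem.Dict.nodup_keys_ofList d
    simpa [PySem.Dict.keys] using h
  exact items_equal (PySem.Dict.ofList d).items hnd
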